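-- pv_equiv track=rewrite | github.com/JustinHendersonSMAPPER/ABBA | src/abba/alignment/enhanced_ensemble_aligner.py | _find_phrase_in_target
-- ===== SOURCE A (Python) =====
-- from typing import Dict, List, Tuple, Optional, Set
--
-- def _find_phrase_in_target(target_words: List[str], phrase_words: List[str]) -> Optional[List[int]]:
--     """Find a phrase in target words, allowing for some flexibility."""
--     target_lower = [w.lower().strip('.,!?;:') for w in target_words]
--     phrase_lower = [w.lower() for w in phrase_words]
--
--     # Exact sequence match
--     for i in range(len(target_lower) - len(phrase_lower) + 1):
--         if target_lower[i:i+len(phrase_lower)] == phrase_lower: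
--             return list(range(i, i + len(phrase_lower)))
--
--     # Flexible match allowing intervening words
--     phrase_indices = []
--     phrase_idx = 0
--
--     for i, word in enumerate(target_lower):
--         if phrase_idx < len(phrase_lower) and word == phrase_lower[phrase_idx]:
--             phrase_indices.append(i)
--             phrase_idx += 1
--
--             if phrase_idx == len(phrase_lower):
--                 # Found complete phrase
--                 if len(phrase_indices) == len(phrase_lower):
--                     return phrase_indices
--
--     return None
-- ===== SOURCE B (Python) =====
-- from typing import Dict, List, Tuple, Optional, Set
--
-- def _find_phrase_in_target(target_words: List[str], phrase_words: List[str]) -> Optional[List[int]]: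
--     """Find a phrase in target words: online prefix-automaton scan for the exact
--     phase (no per-position slice copies), then per-word index jumps for the
--     flexible subsequence phase."""
--     phrase = [w.lower() for w in phrase_words]
--     m = len(phrase)
--     if m == 0:
--         return []
--     norm = [w.lower().strip('.,!?;:') for w in target_words]
--
--     # Exact phase: one left-to-right pass keeping the set of live prefix lengths.
--     active = []
--     for i, w in enumerate(norm):
--         active = [k + 1 for k in active + [0] if k < m and phrase[k] == w]
--         if m in active:
--             return list(range(i - m + 1, i + 1))
--
--     # Flexible phase: for each phrase word, jump to its next occurrence.
--     indices = []
--     pos = 0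
--     for pw in phrase:
--         try:
--             pos = norm.index(pw, pos)
--         except ValueError:
--             return None
--         indices.append(pos)
--         pos += 1
--     return indices
-- ===== Notes on version B (the rewrite author's own statement) =====
-- stated objective: alternative
-- what changed: The exact-match phase scans the target once with a prefix-automaton (a set of live prefix lengths) instead of comparing a freshly copied m-word slice at every start position, and the flexible phase jumps with list.index per phrase word instead of walking enumerate with a pointer.
import Mathlib
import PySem

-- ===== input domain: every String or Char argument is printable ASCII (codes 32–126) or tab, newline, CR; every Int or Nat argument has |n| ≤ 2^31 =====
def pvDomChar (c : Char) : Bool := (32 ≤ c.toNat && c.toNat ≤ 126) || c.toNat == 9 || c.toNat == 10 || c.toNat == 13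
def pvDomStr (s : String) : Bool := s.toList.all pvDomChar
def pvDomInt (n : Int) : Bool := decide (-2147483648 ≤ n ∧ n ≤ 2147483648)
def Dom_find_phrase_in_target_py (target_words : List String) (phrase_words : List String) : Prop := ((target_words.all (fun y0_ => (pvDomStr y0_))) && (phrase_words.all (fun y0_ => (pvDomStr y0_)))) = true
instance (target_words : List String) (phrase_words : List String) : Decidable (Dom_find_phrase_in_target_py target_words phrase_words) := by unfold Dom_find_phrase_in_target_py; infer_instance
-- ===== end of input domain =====

-- B replaces A's per-position slice comparison by a one-pass prefix-automaton scan and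
-- the flexible pass by per-phrase-word index jumps (objective: alternative algorithm).


-- ===== PORT A =====
-- exact-sequence loop: 'for i in range(len(target_lower) - len(phrase_lower) + 1): …' with early return
def pvExactA (norm : List String) (phr : List String) : List Int → Option (List Int)
  | [] => none
  | i :: rest =>
    if PySem.List.slice norm (some i) (some (i + PySem.List.len phr)) = phr then
      some (PySem.List.pyRange i (i + PySem.List.len phr) 1)
    else pvExactA norm phr rest

-- flexible loop: 'for i, word in enumerate(target_lower): …' with state (phrase_indices, phrase_idx)
def pvFlexA (phr : List String) : List (Int × String) → List Int → Int → Option (List Int)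
  | [], _, _ => none
  | (i, word) :: rest, idxs, pidx =>
    -- 'phrase_idx < len(phrase_lower) and word == phrase_lower[phrase_idx]': the first conjunct
    -- guards the indexing (Python's short-circuit 'and'), so pyGetD's default is never read
    if pidx < PySem.List.len phr ∧ word = PySem.List.pyGetD phr pidx "" then
      if pidx + 1 = PySem.List.len phr then
        if PySem.List.len (idxs ++ [i]) = PySem.List.len phr then some (idxs ++ [i])
        else pvFlexA phr rest (idxs ++ [i]) (pidx + 1)
      else pvFlexA phr rest (idxs ++ [i]) (pidx + 1)
    else pvFlexA phr rest idxs pidx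

def find_phrase_in_target_py (target_words : List String) (phrase_words : List String) : Option (List Int) :=
  let target_lower := target_words.map (fun w => PySem.Str.stripChars (PySem.Str.lower w) ".,!?;:")
  let phrase_lower := phrase_words.map PySem.Str.lower
  match pvExactA target_lower phrase_lower
      (PySem.List.pyRange 0 (PySem.List.len target_lower - PySem.List.len phrase_lower + 1) 1) with
  | some r => some r
  | none => pvFlexA phrase_lower (PySem.List.enumerate target_lower 0) [] 0

-- ===== PORT B =====
-- exact phase: single pass over enumerate(norm) keeping the list 'active' of live prefix lengths
def pvExactB (phr : List String) (m : Int) : List (Int × String) → List Int → Option (List Int)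
  | [], _ => none
  | (i, w) :: rest, active =>
    -- '[k + 1 for k in active + [0] if k < m and phrase[k] == w]'; 'k < m' guards the indexing
    let active' := ((active ++ [0]).filter
        (fun k => decide (k < m) && (PySem.List.pyGetD phr k "" == w))).map (· + 1)
    if m ∈ active' then some (PySem.List.pyRange (i - m + 1) (i + 1) 1)
    else pvExactB phr m rest active'

-- flexible phase: 'for pw in phrase: pos = norm.index(pw, pos)'; pos stays ≥ 0, so
-- 'norm.index(pw, pos)' is exactly 'pos + offset of first match in norm[pos:]' (ValueError = none)
def pvFlexB (norm : List String) : List String → List Int → Int → Option (List Int)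
  | [], idxs, _ => some idxs
  | pw :: rest, idxs, pos =>
    match PySem.List.index? (norm.drop pos.toNat) pw with
    | none => none
    | some j => pvFlexB norm rest (idxs ++ [pos + (j : Int)]) (pos + (j : Int) + 1)

def find_phrase_in_target_py_alt (target_words : List String) (phrase_words : List String) : Option (List Int) :=
  let phrase := phrase_words.map PySem.Str.lower
  let m := PySem.List.len phrase
  if m = 0 then some [] else
    let norm := target_words.map (fun w => PySem.Str.stripChars (PySem.Str.lower w) ".,!?;:")
    match pvExactB phrase m (PySem.List.enumerate norm 0) [] with
    | some r => some r
    | none => pvFlexB norm phrase [] 0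

-- ===== PRECONDITION & SPEC =====
def Spec_find_phrase_in_target_py (target_words : List String) (phrase_words : List String) (out : Option (List Int)) : Prop := out = find_phrase_in_target_py_alt target_words phrase_words
instance (target_words : List String) (phrase_words : List String) (out : Option (List Int)) : Decidable (Spec_find_phrase_in_target_py target_words phrase_words out) := by unfold Spec_find_phrase_in_target_py; infer_instance

-- ===== CLAIM (what is proved, stated in full; the proofs are below) =====
def Claim_equal_find_phrase_in_target_py : Prop := ∀ (target_words : List String) (phrase_words : List String), Dom_find_phrase_in_target_py target_words phrase_words → Spec_find_phrase_in_target_py target_words phrase_words (find_phrase_in_target_py target_words phrase_words)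

-- ===== LEMMAS AND PROOFS =====

-- first index s with phr a prefix of l.drop s (the common specification of both exact phases)
def pvFirstOcc (phr : List String) : List String → Option Nat
  | [] => if phr <+: ([] : List String) then some 0 else none
  | w :: t => if phr <+: w :: t then some 0 else (pvFirstOcc phr t).map (· + 1)

-- greedy subsequence match (the common specification of both flexible phases)
def pvSub : List String → Nat → List String → Option (List Int)
  | _, _, [] => some []
  | [], _, _ :: _ => none
  | w :: ws, i, p :: ps =>
    if w = p then (pvSub ws (i + 1) ps).map (fun r => ((i : Int) :: r))
    else pvSub ws (i + 1) (p :: ps)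

-- no occurrence of phr ends inside pre
def pvNoOcc (phr pre : List String) : Prop := ∀ e ≤ pre.length, ¬ phr <:+ pre.take e

-- the loop invariant of B's exact phase: active holds exactly the live prefix lengths
def pvInv (phr pre : List String) (active : List Int) : Prop :=
  ∀ x : Int, x ∈ active ↔
    ∃ j : Nat, x = (j : Int) ∧ 1 ≤ j ∧ j ≤ phr.length ∧ j ≤ pre.length ∧ phr.take j <:+ pre

lemma pvFirstOcc_cons (phr : List String) (w : String) (t : List String) :
    pvFirstOcc phr (w :: t)
      = if phr <+: w :: t then some 0 else (pvFirstOcc phr t).map (· + 1) := rfl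

lemma pvSub_nil (l : List String) (i : Nat) : pvSub l i [] = some [] := by
  cases l <;> rfl

lemma pvSub_cons (w : String) (ws : List String) (i : Nat) (p : String) (ps : List String) :
    pvSub (w :: ws) i (p :: ps)
      = if w = p then (pvSub ws (i + 1) ps).map (fun r => ((i : Int) :: r))
        else pvSub ws (i + 1) (p :: ps) := rfl

lemma pvFirstOcc_none (phr : List String) :
    ∀ l : List String, (∀ s, ¬ phr <+: l.drop s) → pvFirstOcc phr l = none := by
  intro l
  induction l with
  | nil =>
    intro h
    unfold pvFirstOcc
    rw [if_neg (by simpa using h 0)]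
  | cons w t ih =>
    intro h
    rw [pvFirstOcc_cons, if_neg (by simpa using h 0), ih (fun s => by simpa using h (s + 1))]
    rfl

lemma pvFirstOcc_some (phr : List String) (hp : phr ≠ []) :
    ∀ (s : Nat) (l : List String), phr <+: l.drop s → (∀ t < s, ¬ phr <+: l.drop t) →
    pvFirstOcc phr l = some s := by
  intro s
  induction s with
  | zero =>
    intro l h1 _
    rw [List.drop_zero] at h1
    cases l with
    | nil => exact absurd (List.prefix_nil.mp h1) hp
    | cons w t => rw [pvFirstOcc_cons, if_pos h1]
  | succ s ih =>
    intro l h1 h2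
    cases l with
    | nil =>
      simp only [List.drop_nil] at h1
      exact absurd (List.prefix_nil.mp h1) hp
    | cons w t =>
      rw [pvFirstOcc_cons, if_neg (by simpa using h2 0 (Nat.succ_pos s))]
      rw [ih t (by simpa using h1) (fun u hu => by simpa using h2 (u + 1) (by omega))]
      rfl

lemma pv_occ_le (phr l : List String) (s : Nat) (hp : phr ≠ []) (h : phr <+: l.drop s) :
    s + phr.length ≤ l.length := by
  have hlen := h.length_le
  rw [List.length_drop] at hlen
  have hpos : 0 < phr.length := List.length_pos_of_ne_nil hp
  omega

lemma pv_start_to_end (phr l : List String) (s : Nat) (h : phr <+: l.drop s) :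
    phr <:+ l.take (s + phr.length) := by
  rw [List.take_add]
  have heq : (l.drop s).take phr.length = phr := (List.prefix_iff_eq_take.mp h).symm
  rw [heq]
  exact List.suffix_append _ _

lemma pv_end_to_start (phr u t : List String) (h : phr <:+ u) :
    phr <+: (u ++ t).drop (u.length - phr.length) := by
  obtain ⟨v, hv⟩ := h
  subst hv
  have heq : (v ++ phr).length - phr.length = v.length := by simp
  rw [heq, List.append_assoc, List.drop_left]
  exact List.prefix_append _ _

lemma pv_noOcc_no_start (phr pre : List String) (hp : phr ≠ []) (hno : pvNoOcc phr pre) :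
    ∀ s, ¬ phr <+: pre.drop s := fun s h =>
  hno (s + phr.length) (pv_occ_le phr pre s hp h) (pv_start_to_end phr pre s h)

lemma pv_slice_eq_iff (norm phr : List String) (i : Nat) :
    (PySem.List.slice norm (some (i : Int)) (some ((i : Int) + (phr.length : Int))) = phr) ↔
      phr <+: norm.drop i := by
  rw [PySem.List.slice_natCast_add]
  constructor
  · intro h
    exact List.prefix_iff_eq_take.mpr h.symm
  · intro h
    exact (List.prefix_iff_eq_take.mp h).symm

lemma pvExactA_aux (norm phr : List String) (hp : phr ≠ []) (hmn : phr.length ≤ norm.length) :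
    ∀ (d i : Nat), i + d = norm.length - phr.length + 1 →
    pvExactA norm phr (PySem.List.pyRange (i : Int) ((norm.length : Int) - (phr.length : Int) + 1) 1)
    = (pvFirstOcc phr (norm.drop i)).map
        (fun s => PySem.List.pyRange ((i + s : Nat) : Int) (((i + s + phr.length) : Nat) : Int) 1) := by
  have hpos : 0 < phr.length := List.length_pos_of_ne_nil hp
  intro d
  induction d with
  | zero =>
    intro i hi
    rw [PySem.List.pyRange_one_eq_nil (by omega)]
    rw [pvFirstOcc_none phr (norm.drop i) ?_]
    · rfl
    · intro s h
      have h1 := h.length_le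
      rw [List.length_drop, List.length_drop] at h1
      omega
  | succ d ih =>
    intro i hi
    have hlt : (i : Int) < (norm.length : Int) - (phr.length : Int) + 1 := by omega
    rw [PySem.List.pyRange_one_cons hlt]
    have hin : i < norm.length := by omega
    unfold pvExactA
    simp only [PySem.List.len_eq]
    by_cases hpre : phr <+: norm.drop i
    · rw [if_pos ((pv_slice_eq_iff norm phr i).mpr hpre)]
      rw [pvFirstOcc_some phr hp 0 (norm.drop i) (by simpa using hpre)
            (fun t ht => absurd ht (Nat.not_lt_zero t))]
      simp only [Option.map_some]
      have e1 : ((i + 0 : Nat) : Int) = (i : Int) := by push_cast; ring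
      have e2 : ((i + 0 + phr.length : Nat) : Int) = (i : Int) + (phr.length : Int) := by
        push_cast; ring
      rw [e1, e2]
    · rw [if_neg (fun hc => hpre ((pv_slice_eq_iff norm phr i).mp hc))]
      rw [show ((i : Int) + 1) = ((i + 1 : Nat) : Int) by push_cast; ring]
      rw [ih (i + 1) (by omega)]
      have hcons : norm.drop i = norm[i] :: norm.drop (i + 1) := List.drop_eq_getElem_cons hin
      rw [hcons, pvFirstOcc_cons, if_neg (by rw [← hcons]; exact hpre)]
      cases hX : pvFirstOcc phr (norm.drop (i + 1)) with
      | none => rfl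
      | some s =>
        simp only [Option.map_some]
        have e1 : i + 1 + s = i + (s + 1) := by omega
        rw [e1]

lemma pvExactA_correct (norm phr : List String) (hp : phr ≠ []) :
    pvExactA norm phr
      (PySem.List.pyRange 0 ((norm.length : Int) - (phr.length : Int) + 1) 1)
    = (pvFirstOcc phr norm).map
        (fun s : Nat => PySem.List.pyRange (s : Int) (((s + phr.length : Nat)) : Int) 1) := by
  by_cases hmn : phr.length ≤ norm.length
  · have h := pvExactA_aux norm phr hp hmn (norm.length - phr.length + 1) 0 (by omega)
    simp only [Nat.zero_add, Nat.cast_zero, List.drop_zero] at h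
    exact h
  · rw [PySem.List.pyRange_one_eq_nil (by omega)]
    rw [pvFirstOcc_none phr norm ?_]
    · rfl
    · intro s h
      have h1 := h.length_le
      rw [List.length_drop] at h1
      omega

lemma pv_take_succ_suffix (phr pre : List String) (w : String) (j : Nat) (hj : j < phr.length) :
    phr.take (j + 1) <:+ pre ++ [w] ↔ (phr.take j <:+ pre ∧ phr[j] = w) := by
  rw [← List.reverse_prefix, ← List.reverse_prefix]
  rw [List.take_add_one, List.getElem?_eq_getElem hj]
  simp only [Option.toList_some, List.reverse_append, List.reverse_cons, List.reverse_nil,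
    List.nil_append, List.singleton_append]
  rw [List.cons_prefix_cons]
  exact and_comm

lemma pv_inv_step (phr pre : List String) (w : String) (active : List Int)
    (hInv : pvInv phr pre active) :
    pvInv phr (pre ++ [w])
      (((active ++ [0]).filter
          (fun k => decide (k < (phr.length : Int)) && (PySem.List.pyGetD phr k "" == w))).map
        (· + 1)) := by
  intro x
  constructor
  · intro hx
    rcases List.mem_map.mp hx with ⟨y, hy, rfl⟩
    rcases List.mem_filter.mp hy with ⟨hymem, hycond⟩
    rw [Bool.and_eq_true] at hycond
    obtain ⟨hylt, hyget⟩ := hycond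
    rcases List.mem_append.mp hymem with hyact | hy0
    · rcases (hInv y).mp hyact with ⟨j, rfl, h1, hjm, hjlen, hsuf⟩
      have hjlt : j < phr.length := by
        have hd := of_decide_eq_true hylt
        exact_mod_cast hd
      have hw : phr[j] = w := by
        have hb := eq_of_beq hyget
        rwa [PySem.List.pyGetD_natCast, List.getD_eq_getElem phr "" hjlt] at hb
      refine ⟨j + 1, by push_cast; ring, by omega, by omega, ?_, ?_⟩
      · rw [List.length_append, List.length_singleton]; omega
      · exact (pv_take_succ_suffix phr pre w j hjlt).mpr ⟨hsuf, hw⟩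
    · have hy' : y = 0 := by simpa using hy0
      subst hy'
      have h0lt : (0 : Nat) < phr.length := by
        have hd := of_decide_eq_true hylt
        exact_mod_cast hd
      have hw : phr[0] = w := by
        have hb := eq_of_beq hyget
        rwa [show ((0 : Int)) = ((0 : Nat) : Int) from rfl, PySem.List.pyGetD_natCast,
          List.getD_eq_getElem phr "" h0lt] at hb
      refine ⟨1, by norm_num, le_refl _, by omega, ?_, ?_⟩
      · rw [List.length_append, List.length_singleton]; omega
      · exact (pv_take_succ_suffix phr pre w 0 h0lt).mpr ⟨by simp, hw⟩
  · rintro ⟨j, rfl, h1, hjm, hjlen, hsuf⟩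
    obtain ⟨j', rfl⟩ : ∃ j', j = j' + 1 := ⟨j - 1, by omega⟩
    have hjlt : j' < phr.length := by omega
    rcases (pv_take_succ_suffix phr pre w j' hjlt).mp hsuf with ⟨hsuf', hw⟩
    have hj'len : j' ≤ pre.length := by
      have hl := hsuf'.length_le
      rwa [List.length_take, Nat.min_eq_left (by omega)] at hl
    have hymem : ((j' : Nat) : Int) ∈ active ++ [0] := by
      rcases Nat.eq_zero_or_pos j' with hz | hposj
      · subst hz; simp
      · exact List.mem_append.mpr
          (Or.inl ((hInv _).mpr ⟨j', rfl, hposj, by omega, hj'len, hsuf'⟩))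
    apply List.mem_map.mpr
    refine ⟨((j' : Nat) : Int), List.mem_filter.mpr ⟨hymem, ?_⟩, by push_cast; ring⟩
    rw [Bool.and_eq_true]
    refine ⟨decide_eq_true (by exact_mod_cast hjlt), ?_⟩
    rw [PySem.List.pyGetD_natCast, List.getD_eq_getElem phr "" hjlt]
    exact beq_iff_eq.mpr hw

lemma pvExactB_correct (phr : List String) (hp : phr ≠ []) :
    ∀ (suf pre : List String) (active : List Int), pvInv phr pre active → pvNoOcc phr pre →
    pvExactB phr (phr.length : Int) (PySem.List.enumerate suf (pre.length : Int)) active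
    = (pvFirstOcc phr (pre ++ suf)).map
        (fun s : Nat => PySem.List.pyRange (s : Int) (((s + phr.length : Nat)) : Int) 1) := by
  intro suf
  induction suf with
  | nil =>
    intro pre active hInv hno
    rw [PySem.List.enumerate_nil]
    rw [List.append_nil, pvFirstOcc_none phr pre (pv_noOcc_no_start phr pre hp hno)]
    rfl
  | cons w t ih =>
    intro pre active hInv hno
    rw [PySem.List.enumerate_cons]
    unfold pvExactB
    have hInv' := pv_inv_step phr pre w active hInv
    by_cases hm : ((phr.length : Int) ∈
        ((active ++ [0]).filter
          (fun k => decide (k < (phr.length : Int)) && (PySem.List.pyGetD phr k "" == w))).map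
        (· + 1))
    · rw [if_pos hm]
      rcases (hInv' _).mp hm with ⟨j, hjx, h1, hjm, hjlen, hsuf⟩
      have hj : j = phr.length := by exact_mod_cast hjx.symm
      subst hj
      rw [List.take_length] at hsuf
      rw [List.length_append, List.length_singleton] at hjlen
      have hocc : phr <+: (pre ++ w :: t).drop (pre.length + 1 - phr.length) := by
        have h := pv_end_to_start phr (pre ++ [w]) t hsuf
        rw [List.length_append, List.length_singleton, List.append_assoc,
          List.singleton_append] at h
        exact h
      have hmin : ∀ s' < pre.length + 1 - phr.length, ¬ phr <+: (pre ++ w :: t).drop s' := by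
        intro s' hs' h
        have hle : s' + phr.length ≤ pre.length := by omega
        have hend := pv_start_to_end phr (pre ++ w :: t) s' h
        rw [List.take_append_of_le_length hle] at hend
        exact hno (s' + phr.length) hle hend
      rw [pvFirstOcc_some phr hp (pre.length + 1 - phr.length) (pre ++ w :: t) hocc hmin]
      simp only [Option.map_some]
      have e1 : (pre.length : Int) - (phr.length : Int) + 1
          = ((pre.length + 1 - phr.length : Nat) : Int) := by omega
      have e2 : (pre.length : Int) + 1
          = (((pre.length + 1 - phr.length) + phr.length : Nat) : Int) := by omega
      rw [e1, e2]
    · rw [if_neg hm]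
      have hno' : pvNoOcc phr (pre ++ [w]) := by
        intro e he hsufE
        rw [List.length_append, List.length_singleton] at he
        rcases Nat.lt_or_ge e (pre.length + 1) with hlt | hge
        · have he' : e ≤ pre.length := by omega
          rw [List.take_append_of_le_length he'] at hsufE
          exact hno e he' hsufE
        · have he' : e = pre.length + 1 := by omega
          subst he'
          rw [List.take_of_length_le (by simp)] at hsufE
          apply absurd hm
          rw [not_not]
          apply (hInv' _).mpr
          refine ⟨phr.length, rfl, List.length_pos_of_ne_nil hp, le_refl _, ?_, ?_⟩
          · have hl := hsufE.length_le
            simpa using hl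
          · rw [List.take_length]; exact hsufE
      have h := ih (pre ++ [w])
        (((active ++ [0]).filter
            (fun k => decide (k < (phr.length : Int)) && (PySem.List.pyGetD phr k "" == w))).map
          (· + 1)) hInv' hno'
      rw [List.length_append, List.length_singleton] at h
      rw [List.append_assoc, List.singleton_append] at h
      rw [show ((pre.length : Int) + 1) = ((pre.length + 1 : Nat) : Int) by push_cast; ring]
      exact h

lemma pvFlexA_correct (phr : List String) :
    ∀ (l : List String) (i q : Nat) (idxs : List Int), idxs.length = q → q < phr.length →
    pvFlexA phr (PySem.List.enumerate l (i : Int)) idxs (q : Int)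
    = (pvSub l i (phr.drop q)).map (fun r => idxs ++ r) := by
  intro l
  induction l with
  | nil =>
    intro i q idxs hlen hq
    rw [PySem.List.enumerate_nil]
    rw [show phr.drop q = phr[q] :: phr.drop (q + 1) from List.drop_eq_getElem_cons hq]
    rfl
  | cons w t ih =>
    intro i q idxs hlen hq
    rw [PySem.List.enumerate_cons]
    unfold pvFlexA
    simp only [PySem.List.len_eq]
    have hdrop : phr.drop q = phr[q] :: phr.drop (q + 1) := List.drop_eq_getElem_cons hq
    have hget : PySem.List.pyGetD phr (q : Int) "" = phr[q] := by
      rw [PySem.List.pyGetD_natCast, List.getD_eq_getElem phr "" hq]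
    by_cases hw : w = phr[q]
    · rw [if_pos ⟨by exact_mod_cast hq, by rw [hget]; exact hw⟩]
      by_cases hqm : q + 1 = phr.length
      · rw [if_pos (by exact_mod_cast hqm)]
        rw [if_pos (by simp [hlen]; exact_mod_cast hqm)]
        rw [hdrop, pvSub_cons, if_pos hw]
        rw [show phr.drop (q + 1) = [] by rw [hqm]; exact List.drop_length]
        rw [pvSub_nil]
        simp
      · rw [if_neg (by intro hc; exact hqm (by exact_mod_cast hc))]
        rw [show ((i : Int) + 1) = ((i + 1 : Nat) : Int) by push_cast; ring,
          show ((q : Int) + 1) = ((q + 1 : Nat) : Int) by push_cast; ring]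
        rw [ih (i + 1) (q + 1) (idxs ++ [(i : Int)]) (by simp [hlen]) (by omega)]
        rw [hdrop, pvSub_cons, if_pos hw]
        cases pvSub t (i + 1) (phr.drop (q + 1)) with
        | none => rfl
        | some r => simp
    · rw [if_neg (by rintro ⟨-, hc⟩; rw [hget] at hc; exact hw hc)]
      rw [show ((i : Int) + 1) = ((i + 1 : Nat) : Int) by push_cast; ring]
      rw [ih (i + 1) q idxs hlen hq]
      rw [hdrop, pvSub_cons, if_neg hw, ← hdrop]

lemma pvSub_index (p : String) (ps : List String) :
    ∀ (l : List String) (i : Nat),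
    pvSub l i (p :: ps) = (match PySem.List.index? l p with
      | none => none
      | some j => (pvSub (l.drop (j + 1)) (i + j + 1) ps).map
          (fun r => (((i + j : Nat) : Int) :: r))) := by
  intro l
  induction l with
  | nil =>
    intro i
    rw [show PySem.List.index? ([] : List String) p = none by
      rw [PySem.List.index?_eq_none_iff]; simp]
    rfl
  | cons w t ih =>
    intro i
    by_cases hw : w = p
    · subst hw
      rw [PySem.List.index?_cons_self]
      rw [pvSub_cons, if_pos rfl]
      simp
    · rw [PySem.List.index?_cons_of_ne _ hw]
      rw [pvSub_cons, if_neg hw, ih (i + 1)]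
      cases hidx : PySem.List.index? t p with
      | none => rfl
      | some j =>
        simp only [Option.map_some, List.drop_succ_cons]
        have e1 : i + 1 + j = i + (j + 1) := by omega
        rw [e1]

lemma pvFlexB_correct (norm : List String) :
    ∀ (ps : List String) (q : Nat) (idxs : List Int),
    pvFlexB norm ps idxs (q : Int) = (pvSub (norm.drop q) q ps).map (fun r => idxs ++ r) := by
  intro ps
  induction ps with
  | nil =>
    intro q idxs
    rw [pvSub_nil]
    simp [pvFlexB]
  | cons p rest ih =>
    intro q idxs
    unfold pvFlexB
    rw [Int.toNat_natCast]
    rw [pvSub_index]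
    cases hidx : PySem.List.index? (norm.drop q) p with
    | none => rfl
    | some j =>
      simp only
      rw [show ((q : Int) + (j : Int) + 1) = ((q + j + 1 : Nat) : Int) by push_cast; ring]
      rw [ih (q + j + 1) (idxs ++ [(q : Int) + (j : Int)])]
      rw [show (norm.drop q).drop (j + 1) = norm.drop (q + j + 1) by
        rw [List.drop_drop]; congr 1]
      cases pvSub (norm.drop (q + j + 1)) (q + j + 1) rest with
      | none => rfl
      | some r => simp

-- ===== VERDICT (by name: the statement is the Claim_ definition above) =====
theorem find_phrase_in_target_py_spec : Claim_equal_find_phrase_in_target_py := by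
  intro tw pw _
  unfold Spec_find_phrase_in_target_py
  unfold find_phrase_in_target_py find_phrase_in_target_py_alt
  simp only [PySem.List.len_eq]
  cases hphr : pw.map PySem.Str.lower with
  | nil =>
    rw [if_pos (by simp)]
    have hpos : (0 : Int) <
        ((tw.map (fun w => PySem.Str.stripChars (PySem.Str.lower w) ".,!?;:")).length : Int)
          - (([] : List String).length : Int) + 1 := by
      have hn := Int.natCast_nonneg
        ((tw.map (fun w => PySem.Str.stripChars (PySem.Str.lower w) ".,!?;:")).length)
      simp only [List.length_nil, Nat.cast_zero]
      omega
    rw [PySem.List.pyRange_one_cons hpos]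
    unfold pvExactA
    simp only [PySem.List.len_eq]
    rw [if_pos (by
      rw [show ((0 : Int) + (([] : List String).length : Int)) = ((0 : Nat) : Int) by simp,
        show ((0 : Int)) = ((0 : Nat) : Int) from rfl,
        PySem.List.slice_natCast]
      simp)]
    rw [show ((0 : Int) + (([] : List String).length : Int)) = (0 : Int) by simp]
    rw [PySem.List.pyRange_one_eq_nil (by omega)]
  | cons p prest =>
    have hp : pw.map PySem.Str.lower ≠ [] := by rw [hphr]; simp
    rw [← hphr]
    set phr := pw.map PySem.Str.lower with hphrdef
    set norm := tw.map (fun w => PySem.Str.stripChars (PySem.Str.lower w) ".,!?;:") with hnormdef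
    rw [if_neg (by
      intro hc
      apply hp
      have hl0 : phr.length = 0 := by exact_mod_cast hc
      exact List.length_eq_zero_iff.mp hl0)]
    rw [pvExactA_correct norm phr hp]
    have hB := pvExactB_correct phr hp norm [] []
      (by intro x
          constructor
          · intro hx; simp at hx
          · rintro ⟨j, _, h1, _, hj0, _⟩
            simp only [List.length_nil] at hj0
            omega)
      (by intro e he hs
          have he0 : e = 0 := by simpa using he
          subst he0
          rw [List.take_nil] at hs
          exact hp (List.suffix_nil.mp hs))
    rw [show ((([] : List String).length : Int)) = (0 : Int) by simp] at hB
    rw [List.nil_append] at hB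
    rw [hB]
    cases hX : pvFirstOcc phr norm with
    | some s => rfl
    | none =>
      rw [show ((0 : Int)) = (((0 : Nat)) : Int) from rfl]
      rw [pvFlexA_correct phr norm 0 0 [] rfl (List.length_pos_of_ne_nil hp),
        pvFlexB_correct norm phr 0 []]
      rw [List.drop_zero, List.drop_zero]
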